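-- pv_equiv track=rewrite | github.com/xoposhiy/russian-doll-bench | server/terminals/hash/hash_terminal.py | _hash_message
-- ===== SOURCE A (Python) =====
-- _MODULUS = 4096
--
-- def _hash_message(message: str, parameter: int) -> str:
--     """Return the seed-specific polynomial hash as three uppercase hex digits."""
--     data = message.encode("utf-8")
--     total = 0
--     factor = 1
--     for byte in data:
--         total = (total + (byte * factor)) % _MODULUS
--         factor = (factor * parameter) % _MODULUS
--     return f"{total:03X}"
-- ===== SOURCE B (Python) =====
-- _MODULUS = 4096
--
-- def _hash_message(message: str, parameter: int) -> str:
--     """Horner's method over the bytes in reverse order: same polynomial hash."""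
--     total = 0
--     for byte in reversed(message.encode("utf-8")):
--         total = (total * parameter + byte) % _MODULUS
--     return f"{total:03X}"
-- ===== Notes on version B (the rewrite author's own statement) =====
-- stated objective: idiomatic
-- what changed: Replaced the two-accumulator loop (running total plus a separate power-of-parameter factor) by Horner's method over the bytes in reverse order with a single accumulator total = (total*parameter + byte) % 4096.
import Mathlib
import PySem

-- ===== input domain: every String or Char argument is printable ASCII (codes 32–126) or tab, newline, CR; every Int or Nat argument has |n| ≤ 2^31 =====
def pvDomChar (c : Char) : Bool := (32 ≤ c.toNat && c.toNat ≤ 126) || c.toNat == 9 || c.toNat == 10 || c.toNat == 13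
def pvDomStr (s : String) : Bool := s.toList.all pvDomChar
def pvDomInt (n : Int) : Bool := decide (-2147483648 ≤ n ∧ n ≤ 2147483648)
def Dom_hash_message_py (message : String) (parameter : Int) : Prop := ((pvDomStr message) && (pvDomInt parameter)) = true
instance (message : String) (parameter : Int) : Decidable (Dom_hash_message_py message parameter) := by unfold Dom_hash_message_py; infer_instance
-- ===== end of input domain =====

-- B replaces A's two-accumulator loop (total + power factor) by Horner's method over the bytes in reverse order; same value, same cost.


-- shared helpers: UTF-8 bytes of an ASCII string (exact on Dom: codes ≤ 126 encode as themselves),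
-- and the f"{total:03X}" formatting (total is always in [0, 4096), so exactly three uppercase hex digits)
def pvBytes (message : String) : List Int := message.toList.map (fun c => (c.toNat : Int))
def pvHexDigit (n : Nat) : Char := if n < 10 then Char.ofNat (48 + n) else Char.ofNat (55 + n)
def pvHex3 (n : Int) : String :=
  String.ofList [pvHexDigit (n.toNat / 256 % 16), pvHexDigit (n.toNat / 16 % 16), pvHexDigit (n.toNat % 16)]

-- ===== PORT A =====
def hash_message_py (message : String) (parameter : Int) : String :=
  let data := pvBytes message
  let st := data.foldl
    (fun (s : Int × Int) byte =>
      (PySem.Int.mod (s.1 + byte * s.2) 4096, PySem.Int.mod (s.2 * parameter) 4096))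
    (0, 1)
  pvHex3 st.1

-- ===== PORT B =====
def hash_message_py_alt (message : String) (parameter : Int) : String :=
  let total := (pvBytes message).reverse.foldl
    (fun total byte => PySem.Int.mod (total * parameter + byte) 4096) 0
  pvHex3 total

-- ===== PRECONDITION & SPEC =====
def Spec_hash_message_py (message : String) (parameter : Int) (out : String) : Prop := out = hash_message_py_alt message parameter
instance (message : String) (parameter : Int) (out : String) : Decidable (Spec_hash_message_py message parameter out) := by unfold Spec_hash_message_py; infer_instance

-- ===== CLAIM (what is proved, stated in full; the proofs are below) =====
def Claim_equal_hash_message_py : Prop := ∀ (message : String) (parameter : Int), Dom_hash_message_py message parameter → Spec_hash_message_py message parameter (hash_message_py message parameter)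

-- ===== LEMMAS AND PROOFS =====

-- the reference polynomial Σ bᵢ·pⁱ, written as a Horner fold
def pvPoly (p : Int) (l : List Int) : Int := l.foldr (fun b acc => b + p * acc) 0

theorem pvMod_eq (x : Int) : PySem.Int.mod x 4096 = x.emod 4096 :=
  PySem.Int.mod_eq_emod_of_pos (a := x) (b := 4096) (by norm_num)

theorem pvModEq_self (a : Int) : Int.ModEq 4096 (a.emod 4096) a :=
  Int.emod_emod_of_dvd a dvd_rfl

theorem pvFoldB (p : Int) (l : List Int) :
    l.foldr (fun b total => (total * p + b).emod 4096) 0 = (pvPoly p l).emod 4096 := by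
  induction l with
  | nil => rfl
  | cons b l ih =>
    simp only [ih, pvPoly, List.foldr] at *
    have h : Int.ModEq 4096 ((l.foldr (fun b acc => b + p * acc) 0).emod 4096 * p + b)
        ((l.foldr (fun b acc => b + p * acc) 0) * p + b) :=
      ((pvModEq_self _).mul_right p).add_right b
    have h2 : (l.foldr (fun b acc => b + p * acc) 0) * p + b
        = b + p * l.foldr (fun b acc => b + p * acc) 0 := by ring
    exact h2 ▸ h

theorem pvFoldA (p : Int) (l : List Int) (t f : Int) :
    (l.foldl (fun (s : Int × Int) byte =>
        ((s.1 + byte * s.2).emod 4096, (s.2 * p).emod 4096)) (t.emod 4096, f)).1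
      = (t + f * pvPoly p l).emod 4096 := by
  induction l generalizing t f with
  | nil => simp [pvPoly]
  | cons b l ih =>
    simp only [List.foldl_cons]
    have ih' := ih (t.emod 4096 + b * f) ((f * p).emod 4096)
    rw [ih']
    have h : Int.ModEq 4096 (t.emod 4096 + b * f + (f * p).emod 4096 * pvPoly p l)
        (t + b * f + (f * p) * pvPoly p l) :=
      ((pvModEq_self t).add_right (b * f)).add ((pvModEq_self (f * p)).mul_right _)
    have h2 : t + b * f + (f * p) * pvPoly p l = t + f * pvPoly p (b :: l) := by
      simp only [pvPoly, List.foldr_cons]; ring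
    exact h2 ▸ h

-- ===== VERDICT (by name: the statement is the Claim_ definition above) =====
theorem hash_message_py_spec : Claim_equal_hash_message_py := by
  intro message parameter _
  unfold Spec_hash_message_py hash_message_py hash_message_py_alt
  simp only [pvMod_eq, List.foldl_reverse]
  have h0 : ((0:Int), (1:Int)) = ((0:Int).emod 4096, 1) := rfl
  rw [h0, pvFoldA, pvFoldB]
  ring_nf
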